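-- pv_equiv track=rewrite | github.com/stereotype441/opengl-api | api_exec.py | filter_apis
-- ===== SOURCE A (Python) =====
-- def filter_apis(apis, condition):
--     result = frozenset()
--     for part in condition.split('||'):
--         part = part.strip()
--         sub_apis = apis
--         for sub_part in part.split('&&'):
--             sub_part = sub_part.strip()
--             if sub_part == 'ctx->API != API_OPENGL_CORE':
--                 sub_apis -= frozenset(['core'])
--             elif sub_part == 'ctx->API != API_OPENGLES2':
--                 sub_apis -= frozenset(['es2', 'es3'])
--             elif sub_part == 'ctx->API != API_OPENGLES':
--                 sub_apis -= frozenset(['es1'])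
--             elif sub_part == 'ctx->API == API_OPENGL':
--                 sub_apis &= frozenset(['compat'])
--             elif sub_part == 'ctx->API == API_OPENGL_CORE':
--                 sub_apis &= frozenset(['core'])
--             elif sub_part == 'ctx->API == API_OPENGLES':
--                 sub_apis &= frozenset(['es1'])
--             elif sub_part == '_mesa_is_gles3(ctx)':
--                 sub_apis &= frozenset(['es3'])
--             elif sub_part == '_mesa_is_desktop_gl(ctx)':
--                 sub_apis &= frozenset(['core', 'compat'])
--             else:
--                 raise Exception(part)
--         result |= sub_apis
--     return result
-- ===== SOURCE B (Python) =====
-- _TESTS = {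
--     'ctx->API != API_OPENGL_CORE': (True, frozenset(['core'])),
--     'ctx->API != API_OPENGLES2': (True, frozenset(['es2', 'es3'])),
--     'ctx->API != API_OPENGLES': (True, frozenset(['es1'])),
--     'ctx->API == API_OPENGL': (False, frozenset(['compat'])),
--     'ctx->API == API_OPENGL_CORE': (False, frozenset(['core'])),
--     'ctx->API == API_OPENGLES': (False, frozenset(['es1'])),
--     '_mesa_is_gles3(ctx)': (False, frozenset(['es3'])),
--     '_mesa_is_desktop_gl(ctx)': (False, frozenset(['core', 'compat'])),
-- }
--
--
-- def filter_apis(apis, condition):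
--     # Parse the condition into DNF: a list of clauses, each a list of
--     # (negated, tag-set) membership tests; unrecognised sub-parts raise
--     # during this parse phase, before apis is ever consulted.
--     clauses = []
--     for part in condition.split('||'):
--         part = part.strip()
--         clause = []
--         for sub_part in part.split('&&'):
--             test = _TESTS.get(sub_part.strip())
--             if test is None:
--                 raise Exception(part)
--             clause.append(test)
--         clauses.append(clause)
--     # Evaluate the formula per element instead of by whole-set operations.
--     return frozenset(x for clause in clauses for x in apis
--                      if all((x in s) != neg for neg, s in clause))
-- ===== Notes on version B (the rewrite author's own statement) =====
-- stated objective: alternative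
-- what changed: B parses the condition once into a DNF list of (negated, tag-set) membership tests (raising Exception(part) on any unrecognised sub-part during the parse, before apis is consulted) and then builds the result by per-element evaluation of the formula over apis, instead of A's per-clause whole-set subtract/intersect/union operations.
import Mathlib
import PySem

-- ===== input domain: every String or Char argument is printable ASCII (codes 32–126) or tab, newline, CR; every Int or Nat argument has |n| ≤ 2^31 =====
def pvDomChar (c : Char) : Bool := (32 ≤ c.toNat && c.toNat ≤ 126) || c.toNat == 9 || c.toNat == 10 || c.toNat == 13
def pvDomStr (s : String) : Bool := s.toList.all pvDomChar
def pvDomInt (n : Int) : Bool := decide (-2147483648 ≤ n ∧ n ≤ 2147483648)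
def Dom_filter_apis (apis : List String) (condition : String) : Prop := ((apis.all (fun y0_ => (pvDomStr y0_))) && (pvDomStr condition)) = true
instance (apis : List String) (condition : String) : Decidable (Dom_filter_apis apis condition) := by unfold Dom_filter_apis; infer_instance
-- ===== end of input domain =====

-- B parses the condition once into a DNF list of membership tests and evaluates it per element,
-- instead of A's per-clause whole-set subtract/intersect/union operations (objective: alternative).
-- Note on side effects: with a MUTABLE set argument A's '-='/'&=' mutate apis in place (caller-observable,
-- and later '||' clauses then see the mutated set); the repo calls filter_apis with frozensets, where
-- '-='/'&=' rebind, and the ports and the claim follow that value semantics. B never mutates apis.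

-- ===== PORT A =====
-- condition.split('||') / part.split('&&'): the separator is a non-empty literal, so split? is always some.
def pvSplit (s sep : String) : List String := (PySem.Str.split? s sep).getD []

-- one iteration of A's inner loop (sp is the already-stripped sub_part);
-- the final else is Python's 'raise Exception(part)': unreachable under Pre_filter_apis.
def pvAStep (sub : PySem.Set String) (sp : String) : PySem.Set String :=
  if sp = "ctx->API != API_OPENGL_CORE" then PySem.Set.diff sub ["core"]
  else if sp = "ctx->API != API_OPENGLES2" then PySem.Set.diff sub ["es2", "es3"]
  else if sp = "ctx->API != API_OPENGLES" then PySem.Set.diff sub ["es1"]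
  else if sp = "ctx->API == API_OPENGL" then PySem.Set.inter sub ["compat"]
  else if sp = "ctx->API == API_OPENGL_CORE" then PySem.Set.inter sub ["core"]
  else if sp = "ctx->API == API_OPENGLES" then PySem.Set.inter sub ["es1"]
  else if sp = "_mesa_is_gles3(ctx)" then PySem.Set.inter sub ["es3"]
  else if sp = "_mesa_is_desktop_gl(ctx)" then PySem.Set.inter sub ["core", "compat"]
  else sub

def filter_apis (apis : List String) (condition : String) : List String :=
  (pvSplit condition "||").foldl
    (fun result part =>
      let part := PySem.Str.strip part
      let sub_apis := (pvSplit part "&&").foldl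
        (fun sub sub_part => pvAStep sub (PySem.Str.strip sub_part))
        (PySem.Set.ofList apis)
      PySem.Set.union result sub_apis)
    PySem.Set.empty

-- ===== PORT B =====
-- the _TESTS dict of Source B: stripped sub_part -> (negated, tag set)
def pvTests : PySem.Dict String (Bool × List String) :=
  PySem.Dict.ofList
  [("ctx->API != API_OPENGL_CORE", (true, ["core"])),
   ("ctx->API != API_OPENGLES2", (true, ["es2", "es3"])),
   ("ctx->API != API_OPENGLES", (true, ["es1"])),
   ("ctx->API == API_OPENGL", (false, ["compat"])),
   ("ctx->API == API_OPENGL_CORE", (false, ["core"])),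
   ("ctx->API == API_OPENGLES", (false, ["es1"])),
   ("_mesa_is_gles3(ctx)", (false, ["es3"])),
   ("_mesa_is_desktop_gl(ctx)", (false, ["core", "compat"]))]

-- one membership test (x in s) != neg
def pvBPred (t : Bool × List String) (x : String) : Bool := (t.2.contains x) != t.1

-- Source B's parse of one sub_part; 'none' is Source B's 'raise Exception(part)', unreachable under Pre_filter_apis
def pvBTest (sp : String) : Bool × List String :=
  (PySem.Dict.get? pvTests (PySem.Str.strip sp)).getD (false, [])

def filter_apis_alt (apis : List String) (condition : String) : List String :=
  let clauses := (pvSplit condition "||").map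
    (fun part => (pvSplit (PySem.Str.strip part) "&&").map pvBTest)
  PySem.Set.ofList
    (clauses.flatMap (fun clause => apis.filter (fun x => clause.all (fun t => pvBPred t x))))

-- ===== PRECONDITION & SPEC =====
def pvRecognized (sp : String) : Bool :=
  ["ctx->API != API_OPENGL_CORE", "ctx->API != API_OPENGLES2", "ctx->API != API_OPENGLES",
   "ctx->API == API_OPENGL", "ctx->API == API_OPENGL_CORE", "ctx->API == API_OPENGLES",
   "_mesa_is_gles3(ctx)", "_mesa_is_desktop_gl(ctx)"].contains sp

-- Pre_ excludes exactly the inputs where Python A raises Exception(part): some stripped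
-- '&&'-sub-part of some '||'-part of the condition is none of the eight recognised tests.
def Pre_filter_apis (apis : List String) (condition : String) : Prop :=
  ((pvSplit condition "||").all
    (fun part => (pvSplit (PySem.Str.strip part) "&&").all
      (fun sub_part => pvRecognized (PySem.Str.strip sub_part)))) = true
instance (apis : List String) (condition : String) : Decidable (Pre_filter_apis apis condition) := by
  unfold Pre_filter_apis; infer_instance

def pvWitness_filter_apis : List String × String :=
  (["core", "compat", "es1", "es2", "es3"], "ctx->API == API_OPENGL_CORE")

def Spec_filter_apis (apis : List String) (condition : String) (out : List String) : Prop := out = filter_apis_alt apis condition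
instance (apis : List String) (condition : String) (out : List String) : Decidable (Spec_filter_apis apis condition out) := by unfold Spec_filter_apis; infer_instance

-- ===== CLAIM (what is proved, stated in full; the proofs are below) =====
def Claim_equal_filter_apis : Prop := ∀ (apis : List String) (condition : String), Dom_filter_apis apis condition → Pre_filter_apis apis condition → Spec_filter_apis apis condition (filter_apis apis condition)

-- ===== LEMMAS AND PROOFS =====

theorem pv_filter_swap (s : List String) (p q : String → Bool) :
    (s.filter p).filter q = (s.filter q).filter p := by
  rw [List.filter_filter, List.filter_filter]
  exact List.filter_congr (fun x _ => Bool.and_comm _ _)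

-- discard is an order-preserving filter, so it commutes with filter
theorem pv_discard_filter (s : List String) (x : String) (p : String → Bool) :
    (PySem.Set.discard s x).filter p = PySem.Set.discard (s.filter p) x :=
  pv_filter_swap s (fun y => y != x) p

-- A's recognised inner step is the filter by B's membership test for the same stripped sub_part.
theorem pvAStep_eq_filter (sub : List String) (sp : String) (h : pvRecognized sp = true) :
    pvAStep sub sp = sub.filter (fun x => pvBPred ((PySem.Dict.get? pvTests sp).getD (false, [])) x) := by
  have g1 : pvTests.get? "ctx->API != API_OPENGL_CORE" = some (true, ["core"]) := by decide
  have g2 : pvTests.get? "ctx->API != API_OPENGLES2" = some (true, ["es2", "es3"]) := by decide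
  have g3 : pvTests.get? "ctx->API != API_OPENGLES" = some (true, ["es1"]) := by decide
  have g4 : pvTests.get? "ctx->API == API_OPENGL" = some (false, ["compat"]) := by decide
  have g5 : pvTests.get? "ctx->API == API_OPENGL_CORE" = some (false, ["core"]) := by decide
  have g6 : pvTests.get? "ctx->API == API_OPENGLES" = some (false, ["es1"]) := by decide
  have g7 : pvTests.get? "_mesa_is_gles3(ctx)" = some (false, ["es3"]) := by decide
  have g8 : pvTests.get? "_mesa_is_desktop_gl(ctx)" = some (false, ["core", "compat"]) := by decide
  simp only [pvRecognized, List.contains_eq_mem, List.mem_cons, List.not_mem_nil, or_false,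
    decide_eq_true_eq] at h
  rcases h with h | h | h | h | h | h | h | h <;> subst h <;>
    simp only [pvAStep, g1, g2, g3, g4, g5, g6, g7, g8, Option.getD_some, String.reduceEq,
      reduceIte] <;>
    exact List.filter_congr (fun x _ => by simp [pvBPred])

-- filter commutes with set(·) (dedup keeps first occurrences, filter is order-preserving)
theorem pv_filter_ofList (xs : List String) (p : String → Bool) :
    (PySem.Set.ofList xs).filter p = PySem.Set.ofList (xs.filter p) := by
  induction xs with
  | nil => rfl
  | cons x xs ih =>
    by_cases hp : p x
    · have h1 : (PySem.Set.ofList (x :: xs)).filter p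
          = x :: PySem.Set.discard ((PySem.Set.ofList xs).filter p) x := by
        rw [PySem.Set.ofList_cons, List.filter_cons_of_pos hp, pv_discard_filter]
      rw [h1, ih, List.filter_cons_of_pos hp, PySem.Set.ofList_cons]
    · have hp' : p x = false := Bool.not_eq_true _ ▸ hp
      have h1 : (PySem.Set.ofList (x :: xs)).filter p
          = PySem.Set.discard ((PySem.Set.ofList xs).filter p) x := by
        rw [PySem.Set.ofList_cons, List.filter_cons_of_neg hp, pv_discard_filter]
      have h2 : PySem.Set.discard ((PySem.Set.ofList xs).filter p) x
          = (PySem.Set.ofList xs).filter p :=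
        List.filter_eq_self.mpr (fun y hy => by
          have hpy : p y = true := (List.mem_filter.mp hy).2
          show (y != x) = true
          simp only [bne_iff_ne, ne_eq]
          rintro rfl
          rw [hpy] at hp'
          exact Bool.true_eq_false.mp hp')
      rw [h1, h2, ih, List.filter_cons_of_neg hp]

-- A's inner foldl over sub_parts = one filter by the conjunction of B's tests
theorem pv_inner (sps : List String) (S : List String)
    (h : ∀ sp ∈ sps, pvRecognized (PySem.Str.strip sp) = true) :
    sps.foldl (fun sub sub_part => pvAStep sub (PySem.Str.strip sub_part)) S
      = S.filter (fun x => (sps.map pvBTest).all (fun t => pvBPred t x)) := by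
  induction sps generalizing S with
  | nil => simp
  | cons sp sps ih =>
    rw [List.foldl_cons, ih _ (fun x hx => h x (List.mem_cons_of_mem _ hx)),
      pvAStep_eq_filter _ _ (h sp List.mem_cons_self), List.filter_filter]
    refine List.filter_congr (fun x _ => ?_)
    simp only [List.map_cons, List.all_cons, pvBTest, Bool.and_comm]

-- A's outer foldl of unions = one Set.update by the concatenated clause results
theorem pv_outer (parts : List String) (g : String → List String) (s : List String) :
    parts.foldl (fun r part => PySem.Set.union r (g part)) s
      = PySem.Set.update s (parts.flatMap g) := by
  induction parts generalizing s with
  | nil => rw [List.foldl_nil, List.flatMap_nil, PySem.Set.update_nil]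
  | cons p parts ih => rw [List.foldl_cons, List.flatMap_cons, PySem.Set.update_append, ih]; rfl

-- update ignores duplicates in its second argument
theorem pv_update_ofList (s t : List String) :
    PySem.Set.update s (PySem.Set.ofList t) = PySem.Set.update s t := by
  rw [PySem.Set.update_eq_append_filter, PySem.Set.update_eq_append_filter, PySem.Set.ofList_ofList]

-- ===== VERDICT (by name: the statement is the Claim_ definition above) =====
theorem filter_apis_spec : Claim_equal_filter_apis := by
  intro apis condition _dom hpre
  unfold Spec_filter_apis filter_apis filter_apis_alt
  simp only [Pre_filter_apis, List.all_eq_true] at hpre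
  rw [PySem.List.foldl_congr_mem _ _
      (fun r part => PySem.Set.union r
        (apis.filter (fun x => ((pvSplit (PySem.Str.strip part) "&&").map pvBTest).all
          (fun t => pvBPred t x)))) _
      (fun r part hpart => by
        have hrec := hpre part hpart
        show PySem.Set.union r _ = _
        rw [pv_inner _ _ hrec, pv_filter_ofList]
        show PySem.Set.update r (PySem.Set.ofList _) = _
        rw [pv_update_ofList]
        rfl),
    pv_outer]
  show PySem.Set.update [] _ = _
  rw [PySem.Set.update_nil_left]
  simp only [List.flatMap_map]
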